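-- pv_equiv track=rewrite | github.com/Hmbown/ZMLX | benchmarks/bench_glm_stress.py | _compare_tokens
-- ===== SOURCE A (Python) =====
-- def _compare_tokens(a: list[int], b: list[int]) -> tuple[int, int, int]:
--     total = max(len(a), len(b))
--     if total == 0:
--         return 0, 0, -1
--     matches = 0
--     first_div = -1
--     for i in range(min(len(a), len(b))):
--         if a[i] == b[i]:
--             matches += 1
--         elif first_div == -1:
--             first_div = i
--     return matches, total, first_div
-- ===== SOURCE B (Python) =====
-- def _compare_tokens(a: list[int], b: list[int]) -> tuple[int, int, int]:
--     pairs = list(zip(a, b))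
--
--     def dc(lo: int, hi: int) -> tuple[int, int]:
--         # (matches, first divergence index or -1) for pairs[lo:hi], by divide and conquer
--         if hi - lo == 0:
--             return 0, -1
--         if hi - lo == 1:
--             x, y = pairs[lo]
--             return (1, -1) if x == y else (0, lo)
--         mid = (lo + hi) // 2
--         m1, f1 = dc(lo, mid)
--         m2, f2 = dc(mid, hi)
--         return m1 + m2, (f1 if f1 != -1 else f2)
--
--     matches, first_div = dc(0, len(pairs))
--     return matches, max(len(a), len(b)), first_div
-- ===== Notes on version B (the rewrite author's own statement) =====
-- stated objective: alternative
-- what changed: Replaced A's single forward index loop with mutable matches/first_div state by a divide-and-conquer recursion over the zipped prefix: each half returns (matches, first divergence or -1) and the results are merged (sum the counts, keep the leftmost divergence), with the empty case falling out of the base case.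
import Mathlib
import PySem

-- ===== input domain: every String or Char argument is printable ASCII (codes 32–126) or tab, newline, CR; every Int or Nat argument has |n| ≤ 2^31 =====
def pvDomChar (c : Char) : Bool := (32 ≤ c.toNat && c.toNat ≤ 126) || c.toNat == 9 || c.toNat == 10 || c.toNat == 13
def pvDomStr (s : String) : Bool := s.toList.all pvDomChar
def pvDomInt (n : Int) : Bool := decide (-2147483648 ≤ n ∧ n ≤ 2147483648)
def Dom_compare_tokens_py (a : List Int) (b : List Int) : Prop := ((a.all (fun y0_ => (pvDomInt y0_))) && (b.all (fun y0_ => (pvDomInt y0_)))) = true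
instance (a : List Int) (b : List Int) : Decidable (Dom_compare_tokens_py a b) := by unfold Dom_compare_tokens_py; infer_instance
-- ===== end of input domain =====

-- B replaces A's single forward loop with mutable matches/first_div state by a
-- divide-and-conquer recursion over the zipped prefix whose halves are merged
-- (sum the counts, keep the leftmost divergence); same value, same cost (alternative).

-- ===== PORT A =====
-- A's 'for i in range(min(len(a),len(b)))' with a[i]/b[i] becomes the obvious
-- simultaneous structural recursion over both lists, carrying the same state
-- (i, matches, first_div); branch order as in the Python.
def compareLoopA : List Int → List Int → Int → Int × Int → Int × Int
  | x :: xs, y :: ys, i, (m, fd) =>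
      if x = y then compareLoopA xs ys (i + 1) (m + 1, fd)
      else if fd = -1 then compareLoopA xs ys (i + 1) (m, i)
      else compareLoopA xs ys (i + 1) (m, fd)
  | _, _, _, st => st

def compare_tokens_py (a : List Int) (b : List Int) : Int × Int × Int :=
  let total : Int := (max a.length b.length : Nat)
  if total = 0 then (0, 0, -1)
  else
    let st := compareLoopA a b 0 (0, -1)
    (st.1, total, st.2)

-- ===== PORT B =====
-- Source B's dc(lo, hi): lo and hi are list positions with 0 ≤ lo ≤ hi in every call,
-- so they are carried as Nat ((lo+hi)//2 is then exactly Nat division); Python's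
-- pairs[lo] is in range (lo < hi ≤ len(pairs)) so it is ported as getD.
def dcB (pairs : List (Int × Int)) (lo hi : Nat) : Int × Int :=
  if hi - lo = 0 then (0, -1)
  else if hi - lo = 1 then
    let p := pairs.getD lo (0, 0)
    if p.1 = p.2 then (1, -1) else (0, (lo : Int))
  else
    let r1 := dcB pairs lo ((lo + hi) / 2)
    let r2 := dcB pairs ((lo + hi) / 2) hi
    (r1.1 + r2.1, if r1.2 ≠ -1 then r1.2 else r2.2)
  termination_by hi - lo
  decreasing_by all_goals omega

def compare_tokens_py_alt (a : List Int) (b : List Int) : Int × Int × Int :=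
  let pairs := a.zip b
  let r := dcB pairs 0 pairs.length
  (r.1, (max a.length b.length : Nat), r.2)

-- ===== PRECONDITION & SPEC =====
def Spec_compare_tokens_py (a : List Int) (b : List Int) (out : Int × Int × Int) : Prop := out = compare_tokens_py_alt a b
instance (a : List Int) (b : List Int) (out : Int × Int × Int) : Decidable (Spec_compare_tokens_py a b out) := by unfold Spec_compare_tokens_py; infer_instance

-- ===== CLAIM (what is proved, stated in full; the proofs are below) =====
def Claim_equal_compare_tokens_py : Prop := ∀ (a : List Int) (b : List Int), Dom_compare_tokens_py a b → Spec_compare_tokens_py a b (compare_tokens_py a b)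

-- ===== LEMMAS AND PROOFS =====

-- Canonical value of both programs on the segment [lo, hi) of the zipped list:
-- (number of matching pairs, index of the first mismatch or -1).
def segSpec (L : List (Int × Int)) (lo hi : Nat) : Int × Int :=
  ( (((((L.drop lo).take (hi - lo)).filter (fun p => p.1 == p.2)).length : Nat) : Int),
    match (PySem.List.enumerate ((L.drop lo).take (hi - lo)) (lo : Int)).find?
        (fun p => p.2.1 != p.2.2) with
    | some p => p.1
    | none => -1 )

-- The first component of anything find? returns on an enumeration from a Nat start is ≥ 0.
theorem find?_enumerate_nonneg {L : List (Int × Int)} {s : Nat} {q : Int × Int × Int}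
    (h : (PySem.List.enumerate L (s : Int)).find? (fun p => p.2.1 != p.2.2) = some q) :
    0 ≤ q.1 := by
  have hm := List.mem_of_find?_eq_some h
  rcases (PySem.List.mem_enumerate_iff L (s : Int) q).1 hm with ⟨k, hk, rfl⟩
  positivity

-- The divide-and-conquer recursion computes segSpec on every in-range segment.
theorem dcB_eq_segSpec (L : List (Int × Int)) :
    ∀ (n lo hi : Nat), hi - lo = n → lo ≤ hi → hi ≤ L.length →
      dcB L lo hi = segSpec L lo hi := by
  intro n
  induction n using Nat.strong_induction_on with
  | _ n ih =>
    intro lo hi hn hlh hhL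
    by_cases h0 : hi - lo = 0
    · have : hi = lo := by omega
      subst this
      simp [dcB, segSpec, PySem.List.enumerate_nil]
    · by_cases h1 : hi - lo = 1
      · have hlt : lo < L.length := by omega
        have hseg : (L.drop lo).take (hi - lo) = [L[lo]] := by
          rw [h1]
          rw [List.take_one]
          simp [List.head?_drop, List.getElem?_eq_getElem hlt]
        have hget : L.getD lo (0, 0) = L[lo] := by
          simp [List.getD, List.getElem?_eq_getElem hlt]
        rw [dcB]
        simp only [h0, h1, if_false, if_true, hget]
        unfold segSpec
        rw [hseg]
        by_cases hxy : (L[lo]).1 = (L[lo]).2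
        · simp [PySem.List.enumerate_cons, PySem.List.enumerate_nil, List.find?, hxy]
        · simp [PySem.List.enumerate_cons, PySem.List.enumerate_nil, List.find?, hxy]
      · -- hi - lo ≥ 2: split at mid
        have h2 : 2 ≤ hi - lo := by omega
        set mid := (lo + hi) / 2 with hmid
        have hlm : lo < mid := by omega
        have hmh : mid < hi := by omega
        have e1 : dcB L lo mid = segSpec L lo mid :=
          ih (mid - lo) (by omega) lo mid rfl (by omega) (by omega)
        have e2 : dcB L mid hi = segSpec L mid hi :=
          ih (hi - mid) (by omega) mid hi rfl (by omega) hhL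
        rw [dcB]
        simp only [h0, h1, if_false, ← hmid, e1, e2]
        -- segment decomposition
        have hsplit : (L.drop lo).take (hi - lo)
            = (L.drop lo).take (mid - lo) ++ (L.drop mid).take (hi - mid) := by
          have h3 : hi - lo = (mid - lo) + (hi - mid) := by omega
          have h4 : lo + (mid - lo) = mid := by omega
          rw [h3, List.take_add, List.drop_drop, h4]
        have hmL : mid ≤ L.length := le_trans (le_of_lt hmh) hhL
        have hlen1 : ((L.drop lo).take (mid - lo)).length = mid - lo := by
          rw [List.length_take, List.length_drop]
          omega
        have hstart : (lo : Int) + ((mid - lo : Nat) : Int) = (mid : Int) := by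
          push_cast
          omega
        simp only [segSpec]
        rw [hsplit, List.filter_append, List.length_append,
            PySem.List.enumerate_append, List.find?_append, hlen1, hstart]
        cases hf1 : ((PySem.List.enumerate ((L.drop lo).take (mid - lo)) (lo : Int)).find?
            (fun p => p.2.1 != p.2.2)) with
        | none =>
          simp
        | some q =>
          have hq : (0 : Int) ≤ q.1 := find?_enumerate_nonneg hf1
          have hne : q.1 ≠ -1 := by omega
          simp [hne]

-- Once first_div is set (≠ -1) A's loop only counts matches and keeps fd.
theorem compareLoopA_set (a : List Int) : ∀ (b : List Int) (i m fd : Int), fd ≠ -1 →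
    compareLoopA a b i (m, fd) =
      (m + (((a.zip b).filter (fun p => p.1 == p.2)).length : Nat), fd) := by
  induction a with
  | nil => intro b i m fd _; cases b <;> simp [compareLoopA]
  | cons x xs ih =>
    intro b i m fd hfd
    cases b with
    | nil => simp [compareLoopA]
    | cons y ys =>
      by_cases hxy : x = y
      · simp [compareLoopA, hxy, ih ys (i + 1) (m + 1) fd hfd]
        ring
      · simp [compareLoopA, hxy, hfd, ih ys (i + 1) m fd hfd]

-- While first_div is still -1, A's loop result is the canonical count plus the
-- first mismatch of the enumeration started at the current index i.
theorem compareLoopA_unset (a : List Int) : ∀ (b : List Int) (i m : Int), 0 ≤ i →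
    compareLoopA a b i (m, -1) =
      (m + (((a.zip b).filter (fun p => p.1 == p.2)).length : Nat),
       match (PySem.List.enumerate (a.zip b) i).find? (fun p => p.2.1 != p.2.2) with
       | some p => p.1
       | none => -1) := by
  induction a with
  | nil => intro b i m _; cases b <;> simp [compareLoopA, PySem.List.enumerate_nil]
  | cons x xs ih =>
    intro b i m hi
    cases b with
    | nil => simp [compareLoopA, PySem.List.enumerate_nil]
    | cons y ys =>
      by_cases hxy : x = y
      · simp [compareLoopA, hxy, PySem.List.enumerate_cons,
              ih ys (i + 1) (m + 1) (by omega)]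
        ring
      · have hi' : i ≠ -1 := by omega
        simp [compareLoopA, hxy, PySem.List.enumerate_cons,
              compareLoopA_set xs ys (i + 1) m i hi']

-- ===== VERDICT (by name: the statement is the Claim_ definition above) =====
theorem compare_tokens_py_spec : Claim_equal_compare_tokens_py := by
  intro a b _
  unfold Spec_compare_tokens_py compare_tokens_py compare_tokens_py_alt
  have hB : dcB (a.zip b) 0 (a.zip b).length = segSpec (a.zip b) 0 (a.zip b).length :=
    dcB_eq_segSpec (a.zip b) (a.zip b).length 0 (a.zip b).length rfl (Nat.zero_le _) le_rfl
  have hseg : ((a.zip b).drop 0).take ((a.zip b).length - 0) = a.zip b := by simp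
  cases a with
  | nil =>
    cases b with
    | nil =>
      simp only [hB, segSpec, hseg]
      simp [PySem.List.enumerate_nil]
    | cons y ys =>
      simp only [hB, segSpec, hseg]
      simp [compareLoopA, PySem.List.enumerate_nil]
      omega
  | cons x xs =>
    have h : ¬ ((max (x :: xs).length b.length : Nat) : Int) = 0 := by
      simp only [Int.natCast_eq_zero, Nat.max_eq_zero_iff]; simp
    simp only [h, if_false, hB, segSpec, hseg,
               compareLoopA_unset (x :: xs) b 0 0 le_rfl, zero_add,
               Nat.cast_zero]
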